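-- pv_equiv track=rewrite | github.com/PedroMAAndre/LearningPython-Cinel | 2. Python/Teste Pedro Andre.py | conta_caracteres
-- ===== SOURCE A (Python) =====
-- def cria_alfabeto():
--     resultado = ""
--     for i in range(ord('a'), ord('z') + 1):
--         resultado += chr(i)
--     return resultado
--
-- def conta_caracteres(frase):
--     minusculas = cria_alfabeto()
--     maiusculas = minusculas.upper()
--     simbolos = ".!?"
--     caracteres = minusculas + maiusculas + simbolos
--
--     conta = 0
--
--     for i in range(0, len(frase)):
--         if frase[i] in caracteres:
--             conta += 1
--     return conta
-- ===== SOURCE B (Python) =====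
-- def conta_caracteres(frase):
--     freq = {}
--     for ch in frase:
--         freq[ch] = freq.get(ch, 0) + 1
--     permitidos = "abcdefghijklmnopqrstuvwxyzABCDEFGHIJKLMNOPQRSTUVWXYZ.!?"
--     return sum(freq.get(ch, 0) for ch in permitidos)
-- ===== Notes on version B (the rewrite author's own statement) =====
-- stated objective: alternative
-- what changed: B builds a frequency table of the input in one pass and then sums the counts of the 55 allowed characters, instead of scanning each input character against the 55-character alphabet string.
import Mathlib
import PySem

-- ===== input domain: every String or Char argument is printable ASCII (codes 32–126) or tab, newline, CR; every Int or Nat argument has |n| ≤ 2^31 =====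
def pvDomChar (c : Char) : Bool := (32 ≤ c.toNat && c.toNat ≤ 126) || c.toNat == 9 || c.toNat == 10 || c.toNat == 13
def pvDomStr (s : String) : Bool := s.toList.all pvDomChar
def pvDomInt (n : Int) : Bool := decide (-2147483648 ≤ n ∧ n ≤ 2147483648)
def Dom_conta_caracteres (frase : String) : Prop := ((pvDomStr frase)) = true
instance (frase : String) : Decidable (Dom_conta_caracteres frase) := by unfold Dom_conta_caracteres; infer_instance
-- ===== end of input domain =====

-- B inverts the traversal: one frequency-table pass over the input, then a sum over the fixed
-- 55-character alphabet (alternative decomposition, same result).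

-- ===== PORT A =====
def cria_alfabeto : List Char :=
  (PySem.List.pyRange 97 123 1).foldl (fun resultado i => resultado ++ [Char.ofNat i.toNat]) []

def conta_caracteres (frase : String) : Int :=
  let minusculas := cria_alfabeto
  let maiusculas := PySem.Chars.upper minusculas
  let simbolos := ".!?".toList
  let caracteres := minusculas ++ maiusculas ++ simbolos
  (PySem.List.pyRange 0 (PySem.Str.len frase) 1).foldl
    (fun conta i =>
      if PySem.Chars.isIn [PySem.List.pyGetD frase.toList i ' '] caracteres then conta + 1 else conta)
    0

-- ===== PORT B =====
def conta_caracteres_alt (frase : String) : Int :=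
  let freq := frase.toList.foldl (fun d ch => d.insert ch (d.getD ch 0 + 1)) PySem.Dict.empty
  let permitidos := "abcdefghijklmnopqrstuvwxyzABCDEFGHIJKLMNOPQRSTUVWXYZ.!?".toList
  (permitidos.map (fun ch => freq.getD ch 0)).sum

-- ===== PRECONDITION & SPEC =====
def Spec_conta_caracteres (frase : String) (out : Int) : Prop := out = conta_caracteres_alt frase
instance (frase : String) (out : Int) : Decidable (Spec_conta_caracteres frase out) := by unfold Spec_conta_caracteres; infer_instance

-- ===== CLAIM (what is proved, stated in full; the proofs are below) =====
def Claim_equal_conta_caracteres : Prop := ∀ (frase : String), Dom_conta_caracteres frase → Spec_conta_caracteres frase (conta_caracteres frase)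

-- ===== LEMMAS AND PROOFS =====

-- the fixed alphabet, shared reference point of both proofs
def pvAllowed : List Char := "abcdefghijklmnopqrstuvwxyzABCDEFGHIJKLMNOPQRSTUVWXYZ.!?".toList

lemma pvCaracteres_eq :
    cria_alfabeto ++ PySem.Chars.upper cria_alfabeto ++ ".!?".toList = pvAllowed := by
  decide

-- `[c] in s` (substring test on a single char) is just membership
lemma pvIsIn_singleton (c : Char) (s : List Char) :
    PySem.Chars.isIn [c] s = s.contains c := by
  by_cases h : c ∈ s
  · have hinf : [c] <:+: s := by
      obtain ⟨pre, suf, rfl⟩ := List.append_of_mem h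
      exact ⟨pre, suf, by simp⟩
    simp [(PySem.Chars.isIn_iff_infix [c] s).mpr hinf, h]
  · have hninf : ¬ [c] <:+: s := fun hinf => h (hinf.mem (by simp))
    simp [(PySem.Chars.isIn_eq_false_iff [c] s).mpr hninf, h]

-- A's counting loop, with accumulator, is a countP
lemma pvFoldl_count (l : List Char) (acc : Int) :
    l.foldl (fun conta c => if PySem.Chars.isIn [c] pvAllowed then conta + 1 else conta) acc
      = acc + (l.countP (fun c => pvAllowed.contains c) : Int) := by
  induction l generalizing acc with
  | nil => simp
  | cons x l ih =>
      simp only [List.foldl_cons]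
      rw [ih, List.countP_cons, pvIsIn_singleton]
      by_cases h : x ∈ pvAllowed <;> simp [h] <;> omega

-- A's loop is a countP over the characters of the input
lemma pvA_eq_countP (frase : String) :
    conta_caracteres frase = (frase.toList.countP (fun c => pvAllowed.contains c) : Int) := by
  unfold conta_caracteres
  simp only [pvCaracteres_eq, PySem.Str.len_eq]
  rw [PySem.List.foldl_pyRange_zero_pyGetD' frase.toList ' '
      (fun conta c => if PySem.Chars.isIn [c] pvAllowed then conta + 1 else conta) 0]
  rw [pvFoldl_count]
  ring

-- the 0/1-indicator summed over a duplicate-free list S is the membership indicator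
lemma pvSum_indicator (x : Char) (S : List Char) (hS : S.Nodup) :
    (S.map (fun ch => if x == ch then (1:Int) else 0)).sum = if S.contains x then 1 else 0 := by
  induction S with
  | nil => simp
  | cons s S ihS =>
      have hS' : S.Nodup := hS.of_cons
      simp only [List.map_cons, List.sum_cons, List.contains_cons]
      rw [ihS hS']
      by_cases h : x = s
      · subst h
        have hnot : x ∉ S := (List.nodup_cons.mp hS).1
        simpa using hnot
      · have h2 : (x == s) = false := beq_eq_false_iff_ne.mpr h
        simp [h2]

-- summing `count ch l` over a duplicate-free list S of characters counts the members of S in l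
lemma pvSum_count (S : List Char) (hS : S.Nodup) (l : List Char) :
    (S.map (fun ch => (l.count ch : Int))).sum = (l.countP (fun c => S.contains c) : Int) := by
  induction l with
  | nil => simp
  | cons x l ih =>
      have hcnt : ∀ ch : Char, ((x :: l).count ch : Int)
          = (l.count ch : Int) + (if x == ch then 1 else 0) := by
        intro ch
        rw [List.count_cons]
        by_cases h : ch = x <;> simp [h]
      have hsum : (S.map (fun ch => ((x :: l).count ch : Int))).sum
          = (S.map (fun ch => (l.count ch : Int))).sum
            + (S.map (fun ch => if x == ch then (1:Int) else 0)).sum := by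
        simp only [hcnt]
        rw [← List.sum_map_add]
      rw [hsum, ih, pvSum_indicator x S hS, List.countP_cons]
      by_cases h : x ∈ S <;> simp [h]

-- B is that same countP
lemma pvB_eq_countP (frase : String) :
    conta_caracteres_alt frase = (frase.toList.countP (fun c => pvAllowed.contains c) : Int) := by
  unfold conta_caracteres_alt
  rw [show frase.toList.foldl (fun d ch => d.insert ch (d.getD ch 0 + 1)) PySem.Dict.empty
      = PySem.Dict.counter frase.toList from
      PySem.Dict.foldl_insert_getD_add_one_eq_counter frase.toList]
  have h : ∀ ch : Char, (PySem.Dict.counter frase.toList).getD ch 0 = (frase.toList.count ch : Int) :=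
    fun ch => PySem.Dict.getD_counter frase.toList ch
  simp only [h]
  exact pvSum_count pvAllowed (by decide) frase.toList

-- ===== VERDICT (by name: the statement is the Claim_ definition above) =====
theorem conta_caracteres_spec : Claim_equal_conta_caracteres := by
  intro frase _
  unfold Spec_conta_caracteres
  rw [pvA_eq_countP, pvB_eq_countP]
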